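-- pv_equiv track=rewrite | github.com/eitan-davis/computersProject_eitan_davis | parse_collom.py | revile_indexes
-- ===== SOURCE A (Python) =====
-- from typing import List
--
-- labale_X = 'x'
--
-- labale_dX = 'dx'
--
-- labale_Y = 'y'
--
-- labale_dY = 'dy'
--
-- def revile_indexes(first_line_vars :List[str]):
--     index_x, index_dx, index_y, index_dy = -1, -1, -1, -1
--
--     for element in enumerate(first_line_vars):
--
--         var = str(element[1]).lower()
--
--         if   var == labale_X:
--             index_x =  element[0]
--
--         elif var == labale_dX:
--             index_dx = element[0]
--
--         elif var == labale_Y: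
--             index_y =  element[0]
--
--         elif var == labale_dY:
--             index_dy = element[0]
--
--     return index_x, index_dx, index_y, index_dy
-- ===== SOURCE B (Python) =====
-- def revile_indexes(first_line_vars):
--     def last_index(label):
--         for i, v in reversed(list(enumerate(first_line_vars))):
--             if str(v).lower() == label:
--                 return i
--         return -1
--     return last_index('x'), last_index('dx'), last_index('y'), last_index('dy')
-- ===== Notes on version B (the rewrite author's own statement) =====
-- stated objective: alternative
-- what changed: Replaces A's single forward pass with a stateful if/elif cascade by four independent backward scans over reversed(enumerate(...)), one per label, each returning the first (i.e. last-occurring) matching index with early termination and -1 if absent.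
import Mathlib
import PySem

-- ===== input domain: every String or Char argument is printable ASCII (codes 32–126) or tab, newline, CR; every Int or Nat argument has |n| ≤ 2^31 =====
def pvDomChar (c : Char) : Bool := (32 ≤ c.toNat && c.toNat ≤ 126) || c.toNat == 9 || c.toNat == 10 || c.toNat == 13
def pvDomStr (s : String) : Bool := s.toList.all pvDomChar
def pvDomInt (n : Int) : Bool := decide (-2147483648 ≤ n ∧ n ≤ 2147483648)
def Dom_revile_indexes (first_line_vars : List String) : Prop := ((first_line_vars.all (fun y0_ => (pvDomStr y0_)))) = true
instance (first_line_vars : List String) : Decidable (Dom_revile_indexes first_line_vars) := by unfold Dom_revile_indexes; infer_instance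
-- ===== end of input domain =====

-- B replaces A's single forward pass with an if/elif cascade by four independent backward
-- scans (one per label) with early termination; objective: alternative decomposition.

-- ===== PORT A =====
def revile_indexes (first_line_vars : List String) : Int × Int × Int × Int :=
  (PySem.List.enumerate first_line_vars).foldl
    (fun (st : Int × Int × Int × Int) element =>
      let var := PySem.Str.lower element.2
      if var = "x" then (element.1, st.2.1, st.2.2.1, st.2.2.2)
      else if var = "dx" then (st.1, element.1, st.2.2.1, st.2.2.2)
      else if var = "y" then (st.1, st.2.1, element.1, st.2.2.2)
      else if var = "dy" then (st.1, st.2.1, st.2.2.1, element.1)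
      else st)
    (-1, -1, -1, -1)

-- ===== PORT B =====
-- B's inner 'last_index': scan reversed(list(enumerate(...))), return on first match, else -1.
def pvLastIndex (label : String) : List (Int × String) → Int
  | [] => -1
  | (i, v) :: rest => if PySem.Str.lower v = label then i else pvLastIndex label rest

def revile_indexes_alt (first_line_vars : List String) : Int × Int × Int × Int :=
  let rev := (PySem.List.enumerate first_line_vars).reverse
  (pvLastIndex "x" rev, pvLastIndex "dx" rev, pvLastIndex "y" rev, pvLastIndex "dy" rev)

-- ===== PRECONDITION & SPEC =====
def Spec_revile_indexes (first_line_vars : List String) (out : Int × Int × Int × Int) : Prop := out = revile_indexes_alt first_line_vars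
instance (first_line_vars : List String) (out : Int × Int × Int × Int) : Decidable (Spec_revile_indexes first_line_vars out) := by unfold Spec_revile_indexes; infer_instance

-- ===== CLAIM (what is proved, stated in full; the proofs are below) =====
def Claim_equal_revile_indexes : Prop := ∀ (first_line_vars : List String), Dom_revile_indexes first_line_vars → Spec_revile_indexes first_line_vars (revile_indexes first_line_vars)

-- ===== LEMMAS AND PROOFS =====

-- last-match fold for a single label, with an explicit default
def pvH (l : List (Int × String)) (label : String) (dflt : Int) : Int :=
  l.foldl (fun acc p => if PySem.Str.lower p.2 = label then p.1 else acc) dflt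

-- pvLastIndex generalized over the default
def pvAux (label : String) : List (Int × String) → Int → Int
  | [], d => d
  | (i, v) :: rest, d => if PySem.Str.lower v = label then i else pvAux label rest d

theorem cascade_eq (l : List (Int × String)) (a b c d : Int) :
    l.foldl
      (fun (st : Int × Int × Int × Int) element =>
        let var := PySem.Str.lower element.2
        if var = "x" then (element.1, st.2.1, st.2.2.1, st.2.2.2)
        else if var = "dx" then (st.1, element.1, st.2.2.1, st.2.2.2)
        else if var = "y" then (st.1, st.2.1, element.1, st.2.2.2)
        else if var = "dy" then (st.1, st.2.1, st.2.2.1, element.1)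
        else st)
      (a, b, c, d)
    = (pvH l "x" a, pvH l "dx" b, pvH l "y" c, pvH l "dy" d) := by
  induction l generalizing a b c d with
  | nil => rfl
  | cons p rest ih =>
    simp only [List.foldl_cons]
    by_cases h1 : PySem.Str.lower p.2 = "x"
    · simpa [pvH, List.foldl_cons, h1] using ih p.1 b c d
    by_cases h2 : PySem.Str.lower p.2 = "dx"
    · simpa [pvH, List.foldl_cons, h1, h2] using ih a p.1 c d
    by_cases h3 : PySem.Str.lower p.2 = "y"
    · simpa [pvH, List.foldl_cons, h1, h2, h3] using ih a b p.1 d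
    by_cases h4 : PySem.Str.lower p.2 = "dy"
    · simpa [pvH, List.foldl_cons, h1, h2, h3, h4] using ih a b c p.1
    · simpa [pvH, List.foldl_cons, h1, h2, h3, h4] using ih a b c d

theorem pvAux_append (label : String) (m : List (Int × String)) (p : Int × String) (d : Int) :
    pvAux label (m ++ [p]) d = pvAux label m (if PySem.Str.lower p.2 = label then p.1 else d) := by
  induction m with
  | nil => rfl
  | cons q rest ih => cases q; simp [pvAux, ih]

theorem pvH_eq_pvAux (l : List (Int × String)) (label : String) (d : Int) :
    pvH l label d = pvAux label l.reverse d := by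
  induction l generalizing d with
  | nil => rfl
  | cons p rest ih =>
    cases p with
    | mk i v =>
      simp only [pvH, List.foldl_cons, List.reverse_cons, pvAux_append]
      exact ih _

theorem pvLastIndex_eq_pvAux (label : String) (m : List (Int × String)) :
    pvLastIndex label m = pvAux label m (-1) := by
  induction m with
  | nil => rfl
  | cons q rest ih => cases q; simp [pvLastIndex, pvAux, ih]

theorem revile_indexes_eq (xs : List String) :
    revile_indexes xs = revile_indexes_alt xs := by
  unfold revile_indexes revile_indexes_alt
  rw [cascade_eq]
  simp only [pvLastIndex_eq_pvAux, ← pvH_eq_pvAux]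

-- ===== VERDICT (by name: the statement is the Claim_ definition above) =====
theorem revile_indexes_spec : Claim_equal_revile_indexes := by
  intro xs _
  exact revile_indexes_eq xs
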